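-- pv_equiv track=rewrite | github.com/Kempy02/generate-telescopic-models | io_modules/design_text.py | first_letter_and_number
-- ===== SOURCE A (Python) =====
-- def first_letter_and_number(s: str) -> str:
--     """
--     Return the first alphabetic character (uppercased) concatenated with the first digit found in s.
--     Examples:
--         'BENDING1' -> 'B1'
--         'linear2'  -> 'L2'
--     Raises ValueError if no letter or no digit is present.
--     """
--     if not isinstance(s, str):
--         raise TypeError("Input must be a string")
--     letter = None
--     digit = None
--     for ch in s:
--         if letter is None and ch.isalpha():
--             letter = ch.upper()
--         if digit is None and ch.isdigit():
--             digit = ch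
--         if letter is not None and digit is not None:
--             return f"{letter}{digit}"
--     raise ValueError("String must contain at least one letter and one digit")
-- ===== SOURCE B (Python) =====
-- def first_letter_and_number(s: str) -> str:
--     if not isinstance(s, str):
--         raise TypeError("Input must be a string")
--     letter = next((c for c in s if c.isalpha()), None)
--     digit = next((c for c in s if c.isdigit()), None)
--     if letter is None or digit is None:
--         raise ValueError("String must contain at least one letter and one digit")
--     return f"{letter.upper()}{digit}"
-- ===== Notes on version B (the rewrite author's own statement) =====
-- stated objective: idiomatic
-- what changed: A's single interleaved early-exit loop tracking two Option states is replaced by two independent first-match searches (next over a generator) combined at the end.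
import Mathlib
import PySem

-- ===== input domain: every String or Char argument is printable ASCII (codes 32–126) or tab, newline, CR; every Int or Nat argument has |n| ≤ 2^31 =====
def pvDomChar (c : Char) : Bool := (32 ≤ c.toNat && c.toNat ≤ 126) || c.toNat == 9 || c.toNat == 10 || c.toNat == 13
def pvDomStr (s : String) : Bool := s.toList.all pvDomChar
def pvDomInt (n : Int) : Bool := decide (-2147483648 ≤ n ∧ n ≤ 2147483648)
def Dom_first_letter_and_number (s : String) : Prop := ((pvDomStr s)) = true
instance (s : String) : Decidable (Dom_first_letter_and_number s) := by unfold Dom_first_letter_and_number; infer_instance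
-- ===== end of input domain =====

-- B replaces A's single interleaved early-exit loop (two Option states) with two
-- independent first-match searches combined at the end (idiomatic).

-- ===== PORT A =====
-- A's loop: carries `letter` and `digit` Options, updates each when still none,
-- returns as soon as both are set; none = the ValueError path (excluded by Pre_).
def pvGoA : List Char → Option Char → Option Char → Option String
  | [], _, _ => none
  | ch :: rest, letter, digit =>
    let letter' := if letter.isNone && PySem.Chars.isalpha ch then some (PySem.Chars.upperChar ch) else letter
    let digit' := if digit.isNone && PySem.Chars.isdigit ch then some ch else digit
    match letter', digit' with
    | some l, some d => some (String.ofList [l, d])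
    | l, d => pvGoA rest l d

def first_letter_and_number (s : String) : String :=
  (pvGoA s.toList none none).getD ""

-- ===== PORT B =====
-- two independent scans: first alphabetic char, first digit; uppercase at the end
def first_letter_and_number_alt (s : String) : String :=
  match s.toList.find? PySem.Chars.isalpha, s.toList.find? PySem.Chars.isdigit with
  | some l, some d => String.ofList [PySem.Chars.upperChar l, d]
  | _, _ => ""   -- ValueError path (excluded by Pre_)

-- ===== PRECONDITION & SPEC =====
-- Pre_: exactly the inputs where Python A returns (otherwise it raises ValueError;
-- B raises the same ValueError there).
def Pre_first_letter_and_number (s : String) : Prop :=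
  s.toList.any PySem.Chars.isalpha = true ∧ s.toList.any PySem.Chars.isdigit = true
instance (s : String) : Decidable (Pre_first_letter_and_number s) := by
  unfold Pre_first_letter_and_number; infer_instance
def pvWitness_first_letter_and_number : String := "linear2"

def Spec_first_letter_and_number (s : String) (out : String) : Prop := out = first_letter_and_number_alt s
instance (s : String) (out : String) : Decidable (Spec_first_letter_and_number s out) := by unfold Spec_first_letter_and_number; infer_instance

-- ===== CLAIM (what is proved, stated in full; the proofs are below) =====
def Claim_equal_first_letter_and_number : Prop := ∀ (s : String), Dom_first_letter_and_number s → Pre_first_letter_and_number s → Spec_first_letter_and_number s (first_letter_and_number s)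

-- ===== LEMMAS AND PROOFS =====
lemma pvGoA_eq (cs : List Char) : ∀ lo dg : Option Char, (lo = none ∨ dg = none) →
    pvGoA cs lo dg =
      match lo.or ((cs.find? PySem.Chars.isalpha).map PySem.Chars.upperChar),
            dg.or (cs.find? PySem.Chars.isdigit) with
      | some l, some d => some (String.ofList [l, d])
      | _, _ => none := by
  induction cs with
  | nil =>
    intro lo dg h
    cases lo <;> cases dg
    case some.some => exact absurd h (by simp)
    all_goals simp [pvGoA]
  | cons ch rest ih =>
    intro lo dg h
    cases lo <;> cases dg
    case some.some => exact absurd h (by simp)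
    all_goals
      by_cases ha : PySem.Chars.isalpha ch = true <;>
        by_cases hd : PySem.Chars.isdigit ch = true <;>
          simp [pvGoA, ha, hd, List.find?, ih]

-- ===== VERDICT (by name: the statement is the Claim_ definition above) =====
theorem first_letter_and_number_spec : Claim_equal_first_letter_and_number := by
  intro s _ hpre
  unfold Spec_first_letter_and_number first_letter_and_number first_letter_and_number_alt
  obtain ⟨hl, hd⟩ := hpre
  rw [pvGoA_eq _ none none (Or.inl rfl)]
  rcases hfl : s.toList.find? PySem.Chars.isalpha with _ | l
  · rw [List.find?_eq_none] at hfl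
    rw [List.any_eq_true] at hl
    obtain ⟨c, hc, hca⟩ := hl
    exact absurd hca (by simpa using hfl c hc)
  · rcases hfd : s.toList.find? PySem.Chars.isdigit with _ | d
    · rw [List.find?_eq_none] at hfd
      rw [List.any_eq_true] at hd
      obtain ⟨c, hc, hcd⟩ := hd
      exact absurd hcd (by simpa using hfd c hc)
    · simp
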